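-- pv_equiv track=rewrite | github.com/TEAMLAB-Lecture/morsecode-LeeHyeonKyu | morsecode.py | is_validated_english_sentence
-- ===== SOURCE A (Python) =====
-- def is_validated_english_sentence(user_input):
--     """
--     Input:
--         - user_input : 문자열값으로 사용자가 입력하는 문자
--     Output:
--         - 입력한 값이 아래에 해당될 경우 False, 그렇지 않으면 True
--           1) 숫자가 포함되어 있거나,
--           2) _@#$%^&*()-+=[]{}"';:\|`~ 와 같은 특수문자가 포함되어 있거나
--           3) 문장부호(.,!?)를 제외하면 입력값이 없거나 빈칸만 입력했을 경우
--     Examples: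
--         >>> import morsecode as mc
--         >>> mc.is_validated_english_sentence("Hello 123")
--         False
--         >>> mc.is_validated_english_sentence("Hi!")
--         True
--         >>> mc.is_validated_english_sentence(".!.")
--         False
--         >>> mc.is_validated_english_sentence("!.!")
--         False
--         >>> mc.is_validated_english_sentence("kkkkk... ^^;")
--         False
--         >>> mc.is_validated_english_sentence("This is Gachon University.")
--         True
--     """
--     # ===Modify codes below=============
--     # 조건에 따라 변환되어야 할 결과를 result 변수에 할당 또는 필요에 따라 자유로운 수정
--     result = ''
--     for s in user_input :
--         if s.isalpha() :
--             result += s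
--         elif s not in ('.', ',', '!', '?', ' ') :
--             return False
--
--     return True if result else False
-- ===== SOURCE B (Python) =====
-- def is_validated_english_sentence(user_input):
--     residue = set(user_input) - {'.', ',', '!', '?', ' '}
--     return bool(residue) and all(c.isalpha() for c in residue)
-- ===== Notes on version B (the rewrite author's own statement) =====
-- stated objective: idiomatic
-- what changed: Replaces the char-by-char loop with early return and an accumulated result string by a set difference of the input's unique characters against the allowed punctuation/space set, validated with bool(residue) and all(isalpha).
import Mathlib
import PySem

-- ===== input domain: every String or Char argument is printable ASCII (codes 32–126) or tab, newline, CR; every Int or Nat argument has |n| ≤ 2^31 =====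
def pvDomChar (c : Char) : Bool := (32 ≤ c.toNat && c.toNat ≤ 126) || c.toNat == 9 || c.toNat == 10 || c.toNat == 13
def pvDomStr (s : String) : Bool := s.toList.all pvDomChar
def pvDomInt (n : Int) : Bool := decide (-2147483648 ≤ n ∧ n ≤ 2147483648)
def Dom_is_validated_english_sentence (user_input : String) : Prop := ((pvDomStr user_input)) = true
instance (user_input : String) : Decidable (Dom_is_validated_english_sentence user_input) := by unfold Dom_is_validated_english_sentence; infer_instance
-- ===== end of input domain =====

-- B is an idiomatic set-based re-statement: unique chars minus the allowed punctuation/space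
-- set must be nonempty and all-alphabetic; equal to A's accumulate-and-early-return loop.

-- ===== PORT A =====
-- the tuple ('.', ',', '!', '?', ' ') of A's membership test
def pvPunctA : List Char := ['.', ',', '!', '?', ' ']

-- A's loop: accumulate alphabetic chars into result, return False on a disallowed char;
-- final 'True if result else False'
def pvLoopA : List Char → List Char → Bool
  | [], result => !result.isEmpty
  | c :: rest, result =>
    if PySem.Chars.isalpha c then pvLoopA rest (result ++ [c])
    else if !(pvPunctA.contains c) then false
    else pvLoopA rest result

def is_validated_english_sentence (user_input : String) : Bool :=
  pvLoopA user_input.toList []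

-- ===== PORT B =====
-- the literal {'.', ',', '!', '?', ' '} of Source B
def pvAllowedB : PySem.Set Char := PySem.Set.ofList ['.', ',', '!', '?', ' ']

def is_validated_english_sentence_alt (user_input : String) : Bool :=
  let residue := PySem.Set.diff (PySem.Set.ofList user_input.toList) pvAllowedB
  !residue.isEmpty && residue.all PySem.Chars.isalpha

-- ===== PRECONDITION & SPEC =====
def Spec_is_validated_english_sentence (user_input : String) (out : Bool) : Prop := out = is_validated_english_sentence_alt user_input
instance (user_input : String) (out : Bool) : Decidable (Spec_is_validated_english_sentence user_input out) := by unfold Spec_is_validated_english_sentence; infer_instance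

-- ===== CLAIM (what is proved, stated in full; the proofs are below) =====
def Claim_equal_is_validated_english_sentence : Prop := ∀ (user_input : String), Dom_is_validated_english_sentence user_input → Spec_is_validated_english_sentence user_input (is_validated_english_sentence user_input)

-- ===== LEMMAS AND PROOFS =====

-- no punctuation/space character is alphabetic
lemma pv_punct_not_alpha : ∀ c ∈ pvPunctA, PySem.Chars.isalpha c = false := by
  intro c hc; fin_cases hc <;> rfl

-- characterisation of A's loop
lemma pvLoopA_eq (cs : List Char) : ∀ res : List Char,
    pvLoopA cs res =
      (cs.all (fun c => PySem.Chars.isalpha c || pvPunctA.contains c) &&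
        (!res.isEmpty || cs.any PySem.Chars.isalpha)) := by
  induction cs with
  | nil => intro res; simp [pvLoopA]
  | cons c rest ih =>
    intro res
    by_cases h : PySem.Chars.isalpha c = true
    · simp [pvLoopA, h, ih]
    · rw [Bool.not_eq_true] at h
      by_cases hm : c ∈ pvPunctA
      · simp [pvLoopA, h, hm, ih]
      · simp [pvLoopA, h, hm]

-- membership in B's residue set
lemma pv_mem_residue (s : String) (c : Char) :
    c ∈ PySem.Set.diff (PySem.Set.ofList s.toList) pvAllowedB ↔
      c ∈ s.toList ∧ c ∉ pvPunctA := by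
  rw [PySem.Set.mem_diff, PySem.Set.mem_ofList, pvAllowedB, PySem.Set.mem_ofList]
  rfl

-- characterisation of B
lemma pvAlt_eq (s : String) :
    is_validated_english_sentence_alt s =
      (s.toList.all (fun c => PySem.Chars.isalpha c || pvPunctA.contains c) &&
        s.toList.any PySem.Chars.isalpha) := by
  apply Bool.eq_iff_iff.mpr
  show (!(PySem.Set.diff (PySem.Set.ofList s.toList) pvAllowedB).isEmpty &&
        (PySem.Set.diff (PySem.Set.ofList s.toList) pvAllowedB).all PySem.Chars.isalpha) = true ↔ _
  rw [Bool.and_eq_true, Bool.and_eq_true, Bool.not_eq_true', List.isEmpty_eq_false_iff,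
    List.all_eq_true, List.all_eq_true, List.any_eq_true]
  constructor
  · rintro ⟨hne, hall⟩
    obtain ⟨x, hx⟩ := List.exists_mem_of_ne_nil _ hne
    obtain ⟨hxs, hxp⟩ := (pv_mem_residue s x).1 hx
    refine ⟨fun c hc => ?_, x, hxs, hall x hx⟩
    by_cases hp : c ∈ pvPunctA
    · simp [hp]
    · simp [hall c ((pv_mem_residue s c).2 ⟨hc, hp⟩)]
  · rintro ⟨hall, x, hx, hxa⟩
    have hxp : x ∉ pvPunctA := fun hmemp => by
      have := pv_punct_not_alpha x hmemp
      rw [this] at hxa; cases hxa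
    constructor
    · intro hnil
      have hm := (pv_mem_residue s x).2 ⟨hx, hxp⟩
      rw [hnil] at hm
      simp at hm
    · intro c hc
      obtain ⟨hcs, hcp⟩ := (pv_mem_residue s c).1 hc
      rcases (by simpa using hall c hcs : PySem.Chars.isalpha c = true ∨ c ∈ pvPunctA) with ha | hp
      · exact ha
      · exact absurd hp hcp

-- ===== VERDICT (by name: the statement is the Claim_ definition above) =====
theorem is_validated_english_sentence_spec : Claim_equal_is_validated_english_sentence := by
  intro s _
  unfold Spec_is_validated_english_sentence is_validated_english_sentence
  rw [pvLoopA_eq, pvAlt_eq]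
  simp
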